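-- pv_equiv track=rewrite | github.com/atreyasha/deep-generative-models | src/generate_samples_VAE.py | squareToSpiral
-- ===== SOURCE A (Python) =====
-- def squareToSpiral(d):
--     D = d-1
--     res = [0]
--     while D >= 0:
--         # downwards
--         if D != d-1:
--             res.extend([res[len(res)-1] + 1])
--         res.extend([res[len(res)-1]+(i+1) for i in range(D)])
--         # rightwards
--         res.extend([res[len(res)-1]+(i+1)*d for i in range(D)])
--         # upwards
--         res.extend([res[len(res)-1]-(i+1) for i in range(D)])
--         # leftwards
--         res.extend([res[len(res)-1]-(i+1)*d for i in range(D-1)])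
--         # update counter, makes move for even and odd respectively
--         D -= 2
--     return res
-- ===== SOURCE B (Python) =====
-- def squareToSpiral(d):
--     # Each ring k is emitted with absolute closed-form index formulas (index = col*d + row),
--     # instead of A's chained relative offsets from the last element.
--     res = []
--     for k in range((d + 1) // 2):
--         s = d - 1 - 2 * k
--         if s == 0:
--             res.append(k * d + k)
--         else:
--             res += [k * d + k + i for i in range(s + 1)]
--             res += [(k + j) * d + (k + s) for j in range(1, s + 1)]
--             res += [(k + s) * d + (k + s - 1 - i) for i in range(s)]
--             res += [(k + s - 1 - j) * d + k for j in range(s - 1)]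
--     return res
-- ===== Notes on version B (the rewrite author's own statement) =====
-- stated objective: simpler
-- what changed: B emits each spiral ring from absolute closed-form index formulas (index = col*d + row, per-ring arithmetic progressions), replacing A's while-loop that chains relative offsets off res[len(res)-1] at every extend.
-- outside the precondition, e.g. on squareToSpiral(0): A returns [0], B returns []; on squareToSpiral(-3): A returns [0], B returns []
import Mathlib
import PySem

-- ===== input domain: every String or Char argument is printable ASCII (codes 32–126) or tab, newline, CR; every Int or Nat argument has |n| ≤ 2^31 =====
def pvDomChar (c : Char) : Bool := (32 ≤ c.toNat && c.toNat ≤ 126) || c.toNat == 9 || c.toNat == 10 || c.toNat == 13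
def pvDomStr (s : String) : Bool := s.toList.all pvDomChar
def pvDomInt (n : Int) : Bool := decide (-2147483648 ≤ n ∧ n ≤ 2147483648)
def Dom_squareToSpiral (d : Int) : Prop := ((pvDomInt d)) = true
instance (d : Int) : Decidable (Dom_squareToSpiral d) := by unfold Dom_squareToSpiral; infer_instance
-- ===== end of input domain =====

-- B emits each spiral ring with absolute closed-form index formulas instead of A's chained
-- relative offsets (objective: simpler).

-- ===== PORT A =====
-- res[len(res)-1] (res is never empty in A)
def pvLast (res : List Int) : Int :=
  (PySem.List.pyGet? res ((res.length : Int) - 1)).getD 0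

-- one body of A's while loop: the five extends, each re-reading res[len(res)-1]
def pvBody (d D : Int) (res : List Int) : List Int :=
  let r1 := if D ≠ d - 1 then res ++ [pvLast res + 1] else res
  let r2 := r1 ++ (PySem.List.pyRange 0 D 1).map (fun i => pvLast r1 + (i + 1))
  let r3 := r2 ++ (PySem.List.pyRange 0 D 1).map (fun i => pvLast r2 + (i + 1) * d)
  let r4 := r3 ++ (PySem.List.pyRange 0 D 1).map (fun i => pvLast r3 - (i + 1))
  r4 ++ (PySem.List.pyRange 0 (D - 1) 1).map (fun i => pvLast r4 - (i + 1) * d)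

def pvLoopA (d : Int) (res : List Int) (D : Int) : List Int :=
  if 0 ≤ D then pvLoopA d (pvBody d D res) (D - 2) else res
termination_by (D + 2).toNat
decreasing_by omega

def squareToSpiral (d : Int) : List Int := pvLoopA d [0] (d - 1)

-- ===== PORT B =====
-- ring k of the spiral, every index given in closed form (index = col*d + row)
def pvRing (d k : Int) : List Int :=
  let s := d - 1 - 2 * k
  if s = 0 then [k * d + k]
  else
    (PySem.List.pyRange 0 (s + 1) 1).map (fun i => k * d + k + i)
    ++ (PySem.List.pyRange 1 (s + 1) 1).map (fun j => (k + j) * d + (k + s))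
    ++ (PySem.List.pyRange 0 s 1).map (fun i => (k + s) * d + (k + s - 1 - i))
    ++ (PySem.List.pyRange 0 (s - 1) 1).map (fun j => (k + s - 1 - j) * d + k)

def squareToSpiral_alt (d : Int) : List Int :=
  (PySem.List.pyRange 0 (PySem.Int.floordiv (d + 1) 2) 1).foldl
    (fun acc k => acc ++ pvRing d k) []

-- ===== PRECONDITION & SPEC =====
-- Pre_ restricts to the natural domain of grid sizes, d ≥ 1 (a d×d grid with at least one
-- cell); for d ≤ 0 A returns [0] while B returns [].
def Pre_squareToSpiral (d : Int) : Prop := 1 ≤ d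
instance (d : Int) : Decidable (Pre_squareToSpiral d) := by unfold Pre_squareToSpiral; infer_instance
def pvWitness_squareToSpiral : Int := 3

def Spec_squareToSpiral (d : Int) (out : List Int) : Prop := out = squareToSpiral_alt d
instance (d : Int) (out : List Int) : Decidable (Spec_squareToSpiral d out) := by
  unfold Spec_squareToSpiral; infer_instance

-- ===== CLAIM (what is proved, stated in full; the proofs are below) =====
def Claim_equal_squareToSpiral : Prop :=
  ∀ (d : Int), Dom_squareToSpiral d → Pre_squareToSpiral d →
    Spec_squareToSpiral d (squareToSpiral d)

-- ===== LEMMAS AND PROOFS =====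

-- rings k, k+1, …, k+m-1 concatenated
def pvRingsN : Nat → Int → Int → List Int
  | 0, _, _ => []
  | m + 1, d, k => pvRing d k ++ pvRingsN m d (k + 1)

theorem pvLast_concat (l : List Int) (x : Int) : pvLast (l ++ [x]) = x := by
  unfold pvLast
  have h : ((l ++ [x]).length : Int) - 1 = (l.length : Int) := by simp
  rw [h, PySem.List.pyGet?_append_length]
  rfl

theorem pvLast_append_map_last (l : List Int) (f : Int → Int) (D : Int) (hD : 1 ≤ D) :
    pvLast (l ++ (PySem.List.pyRange 0 D 1).map f) = f (D - 1) := by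
  have h2 : PySem.List.pyRange 0 D 1 = PySem.List.pyRange 0 (D - 1) 1 ++ [D - 1] := by
    conv_lhs => rw [show D = (D - 1) + 1 from by ring]
    exact PySem.List.pyRange_one_succ_right (by omega)
  rw [h2, List.map_append, ← List.append_assoc, List.map_singleton, pvLast_concat]

-- the four extends of one iteration of A's loop (k ≥ 0, side length D ≥ 1) build exactly ring k
theorem pvMap_shift (f : Int → Int) (b : Int) :
    (PySem.List.pyRange 1 (b + 1) 1).map f
      = (PySem.List.pyRange 0 b 1).map (fun i => f (i + 1)) := by
  simp only [PySem.List.pyRange_one]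
  rw [show b + 1 - 1 = b - 0 from by ring]
  simp only [List.map_map]
  apply List.map_congr_left
  intro j _
  simp only [Function.comp]
  congr 1
  ring

-- the four extends of one iteration of A's loop (side length D ≥ 1) build exactly ring k
theorem pvBody_main (d k D : Int) (res : List Int) (hDval : D = d - 1 - 2 * k) (hD1 : 1 ≤ D) :
    (let r1 := res ++ [k * d + k]
     let r2 := r1 ++ (PySem.List.pyRange 0 D 1).map (fun i => pvLast r1 + (i + 1))
     let r3 := r2 ++ (PySem.List.pyRange 0 D 1).map (fun i => pvLast r2 + (i + 1) * d)
     let r4 := r3 ++ (PySem.List.pyRange 0 D 1).map (fun i => pvLast r3 - (i + 1))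
     r4 ++ (PySem.List.pyRange 0 (D - 1) 1).map (fun i => pvLast r4 - (i + 1) * d))
    = res ++ pvRing d k := by
  show (((res ++ [k * d + k]
      ++ (PySem.List.pyRange 0 D 1).map (fun i => pvLast (res ++ [k * d + k]) + (i + 1))) ++ _) ++ _) ++ _ = _
  rw [pvLast_concat]
  rw [show pvLast ((res ++ [k * d + k])
        ++ (PySem.List.pyRange 0 D 1).map (fun i => k * d + k + (i + 1))) = k * d + k + D from by
      rw [pvLast_append_map_last _ _ _ hD1]; ring]
  rw [show pvLast (((res ++ [k * d + k])
        ++ (PySem.List.pyRange 0 D 1).map (fun i => k * d + k + (i + 1)))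
        ++ (PySem.List.pyRange 0 D 1).map (fun i => k * d + k + D + (i + 1) * d))
      = k * d + k + D + D * d from by
      rw [pvLast_append_map_last _ _ _ hD1]; ring]
  rw [show pvLast ((((res ++ [k * d + k])
        ++ (PySem.List.pyRange 0 D 1).map (fun i => k * d + k + (i + 1)))
        ++ (PySem.List.pyRange 0 D 1).map (fun i => k * d + k + D + (i + 1) * d))
        ++ (PySem.List.pyRange 0 D 1).map (fun i => k * d + k + D + D * d - (i + 1)))
      = k * d + k + D * d from by
      rw [pvLast_append_map_last _ _ _ hD1]; ring]
  simp only [pvRing]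
  rw [if_neg (show ¬(d - 1 - 2 * k = 0) by omega), ← hDval]
  have hP1 : (PySem.List.pyRange 0 (D + 1) 1).map (fun i => k * d + k + i)
      = (k * d + k) :: (PySem.List.pyRange 0 D 1).map (fun i => k * d + k + (i + 1)) := by
    rw [PySem.List.pyRange_one_cons (by omega : (0:Int) < D + 1), List.map_cons,
      show (0:Int) + 1 = 1 from by norm_num, pvMap_shift]
    congr 1
    ring
  have hP2 : (PySem.List.pyRange 1 (D + 1) 1).map (fun j => (k + j) * d + (k + D))
      = (PySem.List.pyRange 0 D 1).map (fun i => k * d + k + D + (i + 1) * d) := by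
    rw [pvMap_shift]
    apply List.map_congr_left
    intro j _
    ring
  have hP3 : (PySem.List.pyRange 0 D 1).map (fun i => (k + D) * d + (k + D - 1 - i))
      = (PySem.List.pyRange 0 D 1).map (fun i => k * d + k + D + D * d - (i + 1)) := by
    apply List.map_congr_left
    intro j _
    ring
  have hP4 : (PySem.List.pyRange 0 (D - 1) 1).map (fun j => (k + D - 1 - j) * d + k)
      = (PySem.List.pyRange 0 (D - 1) 1).map (fun i => k * d + k + D * d - (i + 1) * d) := by
    apply List.map_congr_left
    intro j _
    ring
  rw [hP1, hP2, hP3, hP4]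
  simp [List.append_assoc]

-- the last element after emitting ring k (side length ≥ 1)
theorem pvRing_last (d k : Int) (l : List Int) (hD1 : 1 ≤ d - 1 - 2 * k) :
    pvLast (l ++ pvRing d k) = (k + 1) * d + (k + 1) - 1 := by
  simp only [pvRing]
  rw [if_neg (show ¬(d - 1 - 2 * k = 0) by omega)]
  by_cases h2 : 2 ≤ d - 1 - 2 * k
  · rw [← List.append_assoc, pvLast_append_map_last _ _ _ (by omega : (1:Int) ≤ d - 1 - 2 * k - 1)]
    ring
  · have hs : d - 1 - 2 * k = 1 := by omega
    rw [hs]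
    rw [show (1:Int) - 1 = 0 from by ring, PySem.List.pyRange_one_eq_nil (le_refl (0:Int))]
    simp only [List.map_nil, List.append_nil, ← List.append_assoc]
    rw [pvLast_append_map_last _ _ _ (le_refl (1:Int))]
    ring

theorem pvLoop_rings : ∀ (m : Nat) (d k : Int) (res : List Int), 1 ≤ k →
    PySem.Int.floordiv (d + 1) 2 - k = m → pvLast res = k * d + k - 1 →
    pvLoopA d res (d - 1 - 2 * k) = res ++ pvRingsN m d k := by
  intro m
  induction m with
  | zero =>
    intro d k res hk hm hl
    have hlt : d + 1 < (k + 1) * 2 :=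
      (PySem.Int.floordiv_lt_iff_lt_mul (by norm_num)).mp (by omega)
    rw [pvLoopA, if_neg (by omega)]
    simp [pvRingsN]
  | succ m ih =>
    intro d k res hk hm hl
    have hge : (k + 1) * 2 ≤ d + 1 :=
      (PySem.Int.le_floordiv_iff_mul_le (by norm_num)).mp (by omega)
    have hD0 : 0 ≤ d - 1 - 2 * k := by omega
    rw [pvLoopA, if_pos hD0]
    by_cases hD1 : 1 ≤ d - 1 - 2 * k
    · have hbody : pvBody d (d - 1 - 2 * k) res = res ++ pvRing d k := by
        simp only [pvBody]
        rw [if_pos (show d - 1 - 2 * k ≠ d - 1 by omega), hl,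
          show k * d + k - 1 + 1 = k * d + k from by ring]
        exact pvBody_main d k (d - 1 - 2 * k) res rfl hD1
      rw [hbody, show d - 1 - 2 * k - 2 = d - 1 - 2 * (k + 1) from by ring,
        ih d (k + 1) _ (by omega) (by omega)
          (pvRing_last d k res hD1)]
      simp [pvRingsN, List.append_assoc]
    · have hD : d - 1 - 2 * k = 0 := by omega
      have hd : d = 2 * k + 1 := by omega
      have hm0 : m = 0 := by
        have : PySem.Int.floordiv (d + 1) 2 = k + 1 := by
          rw [PySem.Int.floordiv_eq_iff_of_pos (by norm_num)]; omega
        omega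
      subst hm0
      have hbody : pvBody d (d - 1 - 2 * k) res = res ++ [k * d + k] := by
        simp only [pvBody, hD]
        rw [if_pos (show (0:Int) ≠ d - 1 by omega), hl,
          show k * d + k - 1 + 1 = k * d + k from by ring]
        rw [PySem.List.pyRange_one_eq_nil (le_refl (0:Int)),
          PySem.List.pyRange_one_eq_nil (by norm_num : (0:Int) - 1 ≤ 0)]
        simp
      rw [hbody, pvLoopA, if_neg (by omega)]
      have hring : pvRing d k = [k * d + k] := by
        simp [pvRing, hD]
      simp [pvRingsN, hring]

theorem pvFlat_rings : ∀ (m : Nat) (d a : Int),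
    (PySem.List.pyRange a (a + m) 1).flatMap (pvRing d) = pvRingsN m d a := by
  intro m
  induction m with
  | zero => intro d a; rw [PySem.List.pyRange_one_eq_nil (by omega)]; rfl
  | succ m ih =>
    intro d a
    rw [show ((m + 1 : Nat) : Int) = (m : Int) + 1 from by push_cast; ring]
    rw [PySem.List.pyRange_one_cons (by omega)]
    rw [List.flatMap_cons, show a + ((m : Int) + 1) = (a + 1) + m from by ring]
    rw [ih d (a + 1)]
    rfl

theorem pvB_eq (d : Int) (hd : 0 < d) :
    squareToSpiral_alt d = pvRingsN (PySem.Int.floordiv (d + 1) 2).toNat d 0 := by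
  have hT1 : 1 ≤ PySem.Int.floordiv (d + 1) 2 :=
    (PySem.Int.le_floordiv_iff_mul_le (by norm_num)).mpr (by omega)
  unfold squareToSpiral_alt
  rw [PySem.List.foldl_append_eq_flatMap, List.nil_append]
  have h0 : PySem.Int.floordiv (d + 1) 2
      = 0 + ((PySem.Int.floordiv (d + 1) 2).toNat : Int) := by omega
  conv_lhs => rw [h0]
  exact pvFlat_rings _ d 0

-- ===== VERDICT (by name: the statement is the Claim_ definition above) =====
theorem squareToSpiral_spec : Claim_equal_squareToSpiral := by
  intro d _ hpre
  unfold Spec_squareToSpiral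
  have h : 0 < d := hpre
  rw [pvB_eq d h]
  have hT1 : 1 ≤ PySem.Int.floordiv (d + 1) 2 :=
    (PySem.Int.le_floordiv_iff_mul_le (by norm_num)).mpr (by omega)
  obtain ⟨t, ht⟩ : ∃ t : Nat, (PySem.Int.floordiv (d + 1) 2).toNat = t + 1 :=
    ⟨(PySem.Int.floordiv (d + 1) 2).toNat - 1, by omega⟩
  rw [ht]
  unfold squareToSpiral
  rw [pvLoopA, if_pos (show (0:Int) ≤ d - 1 by omega)]
  by_cases hd2 : 1 ≤ d - 1
  · have hbody0 : pvBody d (d - 1) [0] = [] ++ pvRing d 0 := by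
      simp only [pvBody]
      rw [if_neg (by simp)]
      rw [show ([(0:Int)] : List Int) = [] ++ [(0:Int) * d + 0] from by norm_num]
      exact pvBody_main d 0 (d - 1) [] (by ring) hd2
    have ht' : PySem.Int.floordiv (d + 1) 2 - 1 = (t : Int) := by omega
    rw [hbody0, show d - 1 - 2 = d - 1 - 2 * 1 from by ring,
      pvLoop_rings t d 1 _ le_rfl ht'
        (by rw [pvRing_last d 0 ([] : List Int) (by omega)]; ring)]
    simp [pvRingsN]
  · have hd1 : d = 1 := by omega
    subst hd1
    have hfl : PySem.Int.floordiv (1 + 1) 2 = 1 := by decide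
    rw [hfl] at ht
    have ht0 : t = 0 := by omega
    subst ht0
    rw [pvLoopA, if_neg (by norm_num)]
    decide
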